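-- pv_equiv track=rewrite | github.com/AgustinNormand/IMDb-Youtube-Scraper | second_source_scraper/DirectorsScraper/DirectorsScraperWorker.py | get_movies_previous_to
-- ===== SOURCE A (Python) =====
-- def get_movies_previous_to(movie_url, director_movies):
--     movie_url_title = movie_url.split("imdb.com")[1]
--     found_movie = False
--     previous_movies = []
--     for director_movie_url in director_movies:
--         director_movie_url_title = director_movie_url.split("imdb.com")[1]
--         if found_movie:
--             previous_movies.append(director_movie_url)
--         else:
--             if movie_url_title == director_movie_url_title:
--                 found_movie = True
--             else:
--                 continue
--     return previous_movies
-- ===== SOURCE B (Python) =====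
-- def get_movies_previous_to(movie_url, director_movies):
--     movie_url_title = movie_url.split("imdb.com")[1]
--     titles = [u.split("imdb.com")[1] for u in director_movies]
--     for i, title in enumerate(titles):
--         if title == movie_url_title:
--             return director_movies[i + 1:]
--     return []
-- ===== Notes on version B (the rewrite author's own statement) =====
-- stated objective: simpler
-- what changed: Replaced the flag-accumulator loop with a find-first-index-then-slice decomposition over a precomputed list of titles; Pre_ excludes exactly the inputs where A raises IndexError (an argument string not containing 'imdb.com'), on which B raises too.
import Mathlib
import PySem

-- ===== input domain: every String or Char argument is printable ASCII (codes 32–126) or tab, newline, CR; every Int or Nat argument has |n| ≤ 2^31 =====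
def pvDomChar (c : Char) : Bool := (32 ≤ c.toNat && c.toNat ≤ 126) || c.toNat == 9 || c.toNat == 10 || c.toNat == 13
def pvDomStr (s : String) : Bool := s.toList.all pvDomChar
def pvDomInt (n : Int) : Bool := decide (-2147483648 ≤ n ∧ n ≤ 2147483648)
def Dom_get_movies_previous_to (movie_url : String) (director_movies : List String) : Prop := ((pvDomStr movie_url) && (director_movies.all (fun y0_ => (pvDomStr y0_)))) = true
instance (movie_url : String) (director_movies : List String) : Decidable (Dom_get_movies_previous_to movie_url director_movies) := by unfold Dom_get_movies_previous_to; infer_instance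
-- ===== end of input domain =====

-- B replaces A's flag-accumulator loop with a find-first-index-then-slice decomposition (same cost, simpler).

-- ===== PORT A =====
-- s.split("imdb.com")[1]; total form via pyGetD, exact under Pre_ (the piece at index 1 exists)
def pvPieces (s : String) : List String :=
  (PySem.Str.split? s "imdb.com").getD []   -- sep ≠ "" so split? is always `some`

def pvTitle (s : String) : String :=
  PySem.List.pyGetD (pvPieces s) 1 ""

def get_movies_previous_to (movie_url : String) (director_movies : List String) : List String :=
  let movie_url_title := pvTitle movie_url
  let st := director_movies.foldl
    (fun (s : Bool × List String) director_movie_url =>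
      let director_movie_url_title := pvTitle director_movie_url
      if s.1 then (true, s.2 ++ [director_movie_url])
      else if movie_url_title == director_movie_url_title then (true, s.2)
      else s)
    (false, [])
  st.2

-- ===== PORT B =====
def get_movies_previous_to_alt (movie_url : String) (director_movies : List String) : List String :=
  let movie_url_title := pvTitle movie_url
  let titles := director_movies.map pvTitle
  match titles.findIdx? (· == movie_url_title) with
  | some i => PySem.List.slice director_movies (some ((i : Int) + 1)) none
  | none => []

-- ===== PRECONDITION & SPEC =====
-- Pre_ excludes exactly the inputs where A raises IndexError: split("imdb.com") must yield ≥ 2 pieces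
-- for movie_url and for every element of director_movies (i.e. "imdb.com" occurs in each).
def Pre_get_movies_previous_to (movie_url : String) (director_movies : List String) : Prop :=
  2 ≤ (pvPieces movie_url).length ∧
  ∀ u ∈ director_movies, 2 ≤ (pvPieces u).length
instance (movie_url : String) (director_movies : List String) : Decidable (Pre_get_movies_previous_to movie_url director_movies) := by unfold Pre_get_movies_previous_to; infer_instance

def pvWitness_get_movies_previous_to : String × List String :=
  ("imdb.com/t1", ["imdb.com/t0", "imdb.com/t1", "imdb.com/t2"])

def Spec_get_movies_previous_to (movie_url : String) (director_movies : List String) (out : List String) : Prop := out = get_movies_previous_to_alt movie_url director_movies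
instance (movie_url : String) (director_movies : List String) (out : List String) : Decidable (Spec_get_movies_previous_to movie_url director_movies out) := by unfold Spec_get_movies_previous_to; infer_instance

-- ===== CLAIM (what is proved, stated in full; the proofs are below) =====
def Claim_equal_get_movies_previous_to : Prop := ∀ (movie_url : String) (director_movies : List String), Dom_get_movies_previous_to movie_url director_movies → Pre_get_movies_previous_to movie_url director_movies → Spec_get_movies_previous_to movie_url director_movies (get_movies_previous_to movie_url director_movies)

-- ===== LEMMAS AND PROOFS =====

-- once the flag is set, A just appends the rest of the list
theorem pvFoldl_true (t : String) (dm : List String) (acc : List String) :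
    (dm.foldl
      (fun (s : Bool × List String) u =>
        if s.1 then (true, s.2 ++ [u])
        else if t == pvTitle u then (true, s.2)
        else s)
      (true, acc)).2 = acc ++ dm := by
  induction dm generalizing acc with
  | nil => simp
  | cons u dm ih =>
    rw [List.foldl_cons, if_pos rfl, ih]
    simp

-- before the flag is set, A's result is B's find-then-drop
theorem pvFoldl_false (t : String) (dm : List String) (acc : List String) :
    (dm.foldl
      (fun (s : Bool × List String) u =>
        if s.1 then (true, s.2 ++ [u])
        else if t == pvTitle u then (true, s.2)
        else s)
      (false, acc)).2 =
    acc ++ (match (dm.map pvTitle).findIdx? (· == t) with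
            | some i => dm.drop (i + 1)
            | none => []) := by
  induction dm generalizing acc with
  | nil => simp
  | cons u dm ih =>
    rw [List.foldl_cons, if_neg (by simp)]
    by_cases h : (t == pvTitle u) = true
    · rw [if_pos h, pvFoldl_true]
      have h2 : (pvTitle u == t) = true := by
        simp only [beq_iff_eq] at h ⊢; exact h.symm
      simp [List.findIdx?_cons, h2]
    · rw [if_neg h, ih]
      have h2 : (pvTitle u == t) = false := by
        simp only [Bool.not_eq_true, beq_eq_false_iff_ne] at h ⊢
        exact fun e => h e.symm
      simp only [List.map_cons, List.findIdx?_cons, h2, Bool.false_eq_true, if_false]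
      cases (dm.map pvTitle).findIdx? (· == t) <;> simp [List.drop_succ_cons]

-- ===== VERDICT (by name: the statement is the Claim_ definition above) =====
theorem get_movies_previous_to_spec : Claim_equal_get_movies_previous_to := by
  intro movie_url director_movies _ _
  unfold Spec_get_movies_previous_to get_movies_previous_to get_movies_previous_to_alt
  simp only [pvFoldl_false, List.nil_append]
  cases hf : (director_movies.map pvTitle).findIdx? (· == pvTitle movie_url) with
  | none => rfl
  | some i =>
    simp only []
    rw [show ((i : Int) + 1) = ((i + 1 : Nat) : Int) by push_cast; ring,
        PySem.List.slice_from_natCast]
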